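-- pv_equiv track=rewrite | github.com/RhubarbJam42/INF100 | uke6Oppgaver/uke_06_oppg_4.py | render_histogram
-- ===== SOURCE A (Python) =====
-- def render_histogram(values):
--     histogram = ''
--     width = len(values)
--     height = max(values)
--     for i in range(height):
--         for j in range(width):
--             if values[j] == height - i or values[j] > height - i:
--                 histogram += '*'
--             else:
--                 histogram += ' '
--         if i == height - 1:
--             histogram += ''
--         else:
--             histogram += '\n'
--
--     return histogram
-- ===== SOURCE B (Python) =====
-- def render_histogram(values):
--     height = max(values)
--     bars = [('*' * max(0, v)).rjust(height) for v in values]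
--     return '\n'.join(''.join(row) for row in zip(*bars))
-- ===== Notes on version B (the rewrite author's own statement) =====
-- stated objective: alternative
-- what changed: B builds each column's vertical bar with '*'*v and rjust, then transposes with zip(*bars) and joins rows, instead of A's cell-by-cell double loop appending characters.
import Mathlib
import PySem

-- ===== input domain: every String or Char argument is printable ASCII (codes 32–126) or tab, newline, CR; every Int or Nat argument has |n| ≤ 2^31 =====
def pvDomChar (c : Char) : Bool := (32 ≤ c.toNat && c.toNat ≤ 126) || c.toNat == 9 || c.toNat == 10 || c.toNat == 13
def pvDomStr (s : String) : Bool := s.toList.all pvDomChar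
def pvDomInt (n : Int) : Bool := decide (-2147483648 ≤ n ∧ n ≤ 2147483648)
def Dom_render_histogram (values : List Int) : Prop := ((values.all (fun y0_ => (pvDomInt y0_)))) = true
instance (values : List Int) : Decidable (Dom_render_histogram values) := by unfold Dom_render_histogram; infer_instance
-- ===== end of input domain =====

-- B renders each value as a vertical bar (stars right-justified to the height) and transposes,
-- instead of A's cell-by-cell double loop; alternative decomposition, same cost.

-- ===== PORT A =====
-- literal port of A; strings are carried as List Char (PySem convention), max([]) raises → Pre_
def render_histogram (values : List Int) : String :=
  let width : Int := PySem.List.len values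
  match PySem.List.max? values (fun x => x) with
  | none => ""   -- max(values) raises ValueError on []; excluded by Pre_
  | some height =>
    let hist : List Char :=
      (PySem.List.pyRange 0 height 1).foldl (fun hist i =>
        let hist := (PySem.List.pyRange 0 width 1).foldl (fun hist j =>
          if PySem.List.pyGetD values j 0 = height - i ∨ height - i < PySem.List.pyGetD values j 0
          then hist ++ ['*'] else hist ++ [' ']) hist
        if i = height - 1 then hist ++ [] else hist ++ ['\n']) []
    String.mk hist

-- ===== PORT B =====
-- s.rjust(w): pad with spaces on the left to width w (no-op if w ≤ len(s)); exact
def rjustChars (cs : List Char) (w : Int) : List Char :=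
  List.replicate (w.toNat - cs.length) ' ' ++ cs

-- zip(*bars): rows of heads until some bar runs out (Python zip stops at the shortest)
def zipStar (bars : List (List Char)) : List (List Char) :=
  if h : bars ≠ [] ∧ ∀ b ∈ bars, b ≠ [] then
    bars.map (fun b => b.headD ' ') :: zipStar (bars.map List.tail)
  else []
termination_by (bars.headD []).length
decreasing_by
  obtain ⟨hne, hall⟩ := h
  match bars, hne, hall with
  | b :: rest, _, hall =>
    have hb : b ≠ [] := hall b (List.mem_cons_self)
    cases b with
    | nil => exact absurd rfl hb
    | cons c cs => simp

def render_histogram_alt (values : List Int) : String :=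
  match PySem.List.max? values (fun x => x) with
  | none => ""   -- max(values) raises ValueError on []; excluded by Pre_
  | some height =>
    let bars := values.map (fun v =>
      rjustChars (PySem.List.pyRepeat ['*'] (max 0 v)) height)
    String.mk (PySem.Chars.join ['\n'] (zipStar bars))

-- ===== PRECONDITION & SPEC =====
-- Pre_ excludes only the empty list, on which A (max([])) raises ValueError
def Pre_render_histogram (values : List Int) : Prop := values ≠ []
instance (values : List Int) : Decidable (Pre_render_histogram values) := by
  unfold Pre_render_histogram; infer_instance
def pvWitness_render_histogram : List Int := ([1, 3, 2])

def Spec_render_histogram (values : List Int) (out : String) : Prop := out = render_histogram_alt values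
instance (values : List Int) (out : String) : Decidable (Spec_render_histogram values out) := by unfold Spec_render_histogram; infer_instance

-- ===== CLAIM (what is proved, stated in full; the proofs are below) =====
def Claim_equal_render_histogram : Prop := ∀ (values : List Int), Dom_render_histogram values → Pre_render_histogram values → Spec_render_histogram values (render_histogram values)

-- ===== LEMMAS AND PROOFS =====

-- the k-th row (from the top) of the histogram of height h
def pvRow (h : Int) (values : List Int) (k : Nat) : List Char :=
  values.map (fun v => if h - k ≤ v then '*' else ' ')

lemma zipStar_eq (n : Nat) : ∀ (bars : List (List Char)), bars ≠ [] →
    (∀ b ∈ bars, b.length = n) →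
    zipStar bars = (List.range n).map (fun i => bars.map (fun b => b.getD i ' ')) := by
  induction n with
  | zero =>
    intro bars hne hlen
    rw [zipStar]
    have : ¬ (bars ≠ [] ∧ ∀ b ∈ bars, b ≠ []) := by
      rintro ⟨h1, h2⟩
      match bars with
      | b :: rest =>
        have := hlen b (List.mem_cons_self)
        have := h2 b (List.mem_cons_self)
        simp_all [List.length_eq_zero_iff]
    simp [this]
  | succ n ih =>
    intro bars hne hlen
    have hnn : ∀ b ∈ bars, b ≠ [] := by
      intro b hb h0
      have := hlen b hb; simp [h0] at this
    rw [zipStar]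
    simp only [dif_pos (And.intro hne hnn)]
    rw [ih (bars.map List.tail)
      (by simpa using hne)
      (by intro b hb
          obtain ⟨c, hc, rfl⟩ := List.mem_map.mp hb
          have := hlen c hc
          have hcne := hnn c hc
          cases c with
          | nil => exact absurd rfl hcne
          | cons x xs => simpa using this)]
    rw [List.range_succ_eq_map]
    simp only [List.map_cons, List.map_map, List.map_map]
    congr 1
    · apply List.map_congr_left
      intro b hb
      have hbne := hnn b hb
      cases b with
      | nil => exact absurd rfl hbne
      | cons c cs => simp
    · apply List.map_congr_left
      intro i _
      simp only [Function.comp_apply]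
      apply List.map_congr_left
      intro b hb
      have hbne := hnn b hb
      cases b with
      | nil => exact absurd rfl hbne
      | cons c cs => simp

lemma bar_length (h : Int) (v : Int) (hv : v ≤ h) :
    (rjustChars (PySem.List.pyRepeat ['*'] (max 0 v)) h).length = h.toNat := by
  rw [PySem.List.pyRepeat_singleton, rjustChars]
  simp only [List.length_append, List.length_replicate]
  omega

lemma bar_getD (h : Int) (v : Int) (hv : v ≤ h) (i : Nat) (hi : i < h.toNat) :
    (rjustChars (PySem.List.pyRepeat ['*'] (max 0 v)) h).getD i ' '
      = if h - i ≤ v then '*' else ' ' := by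
  rw [PySem.List.pyRepeat_singleton, rjustChars]
  simp only [List.length_replicate]
  set s := (max 0 v).toNat with hs
  have hsle : s ≤ h.toNat := by omega
  by_cases hcase : i < h.toNat - s
  · rw [List.getD_append _ _ _ _ (by simp only [List.length_replicate]; omega)]
    rw [if_neg (by omega)]
    exact List.getD_replicate _ (by omega)
  · rw [List.getD_append_right _ _ _ _ (by simp only [List.length_replicate]; omega)]
    rw [if_pos (by omega)]
    simp only [List.length_replicate]
    exact List.getD_replicate _ (by omega)

lemma join_snoc (sep : List Char) : ∀ (rs : List (List Char)) (last : List Char),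
    PySem.Chars.join sep (rs ++ [last]) = rs.flatMap (fun r => r ++ sep) ++ last := by
  intro rs
  induction rs with
  | nil => intro last; simp [PySem.Chars.join_singleton]
  | cons a t ih =>
    intro last
    obtain ⟨b, bs, hb⟩ := List.exists_cons_of_ne_nil
      (show t ++ [last] ≠ [] by simp)
    rw [List.cons_append, hb, PySem.Chars.join_cons_cons, ← hb, ih]
    simp

lemma pv_flatMap_map_congr {α β γ : Type} (l : List α) (f : α → β) (g : β → List γ)
    (g' : α → List γ) (hfg : ∀ x ∈ l, g (f x) = g' x) :
    (l.map f).flatMap g = l.flatMap g' := by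
  induction l with
  | nil => rfl
  | cons a t ih => simp_all

theorem render_histogram_spec : Claim_equal_render_histogram := by
  intro values _ hpre
  unfold Spec_render_histogram render_histogram render_histogram_alt
  obtain ⟨x, t, rfl⟩ := List.exists_cons_of_ne_nil hpre
  set values := x :: t with hvals
  obtain ⟨h, hmax⟩ : ∃ h, PySem.List.max? values (fun x => x) = some h := by
    rw [hvals, PySem.List.max?_id_cons]; exact ⟨_, rfl⟩
  have hle : ∀ v ∈ values, v ≤ h := fun v hv => by
    simpa using PySem.List.max?_isMax hmax v hv
  rw [hmax]
  simp only
  set n := h.toNat with hn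
  -- the list of bars on the B side
  set bar : Int → List Char :=
    fun v => rjustChars (PySem.List.pyRepeat ['*'] (max 0 v)) h with hbar
  have hbars : zipStar (values.map bar)
      = (List.range n).map (fun i => values.map (fun v => (bar v).getD i ' ')) := by
    rw [zipStar_eq n (values.map bar) (by simp [hvals])
      (by intro b hb
          obtain ⟨v, hv, rfl⟩ := List.mem_map.mp hb
          exact bar_length h v (hle v hv))]
    apply List.map_congr_left
    intro i _
    simp [List.map_map]
  have hrows : ∀ i ∈ List.range n,
      values.map (fun v => (bar v).getD i ' ') = pvRow h values i := by
    intro i hi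
    apply List.map_congr_left
    intro v hv
    exact bar_getD h v (hle v hv) i (by have := List.mem_range.mp hi; omega)
  rw [hbars, List.map_congr_left hrows]
  -- now the A side
  by_cases hpos : h ≤ 0
  · have h0 : n = 0 := by omega
    rw [PySem.List.pyRange_one_eq_nil hpos]
    simp [h0, PySem.Chars.join_nil]
  · push_neg at hpos
    -- A's inner loop: one row of characters
    have hinner : ∀ (hist : List Char) (i : Int),
        (PySem.List.pyRange 0 (PySem.List.len values) 1).foldl (fun hist j =>
          if PySem.List.pyGetD values j 0 = h - i ∨ h - i < PySem.List.pyGetD values j 0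
          then hist ++ ['*'] else hist ++ [' ']) hist
        = hist ++ values.map (fun v => if h - i ≤ v then '*' else ' ') := by
      intro hist i
      have := PySem.List.foldl_pyRange_zero_pyGetD values (0 : Int)
        (fun acc v => if h - i ≤ v then acc ++ ['*'] else acc ++ [' ']) hist
      rw [show (fun (hist : List Char) (j : Int) =>
          if PySem.List.pyGetD values j 0 = h - i ∨ h - i < PySem.List.pyGetD values j 0
          then hist ++ ['*'] else hist ++ [' '])
        = (fun acc j => if h - i ≤ PySem.List.pyGetD values j 0
            then acc ++ ['*'] else acc ++ [' ']) from by
          funext acc j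
          by_cases hc : h - i ≤ PySem.List.pyGetD values j 0
          · rw [if_pos hc, if_pos (by omega)]
          · rw [if_neg hc, if_neg (by omega)], this]
      rw [show (fun (acc : List Char) (v : Int) =>
          if h - i ≤ v then acc ++ ['*'] else acc ++ [' '])
        = (fun acc v => acc ++ [if h - i ≤ v then '*' else ' ']) from by
          funext acc v; split_ifs <;> rfl]
      rw [PySem.List.foldl_append_singleton_eq_map]
    have hcast : (n : Int) = h := by omega
    obtain ⟨m, hm⟩ : ∃ m, n = m + 1 := ⟨n - 1, by omega⟩
    have hmi : ((m : Nat) : Int) = h - 1 := by omega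
    -- each outer step appends one row and (except after the last row) one newline
    have hstep : ∀ (acc : List Char) (i : Int), i ∈ PySem.List.pyRange 0 h 1 →
        (if i = h - 1 then
          ((PySem.List.pyRange 0 (PySem.List.len values) 1).foldl (fun hist j =>
            if PySem.List.pyGetD values j 0 = h - i ∨ h - i < PySem.List.pyGetD values j 0
            then hist ++ ['*'] else hist ++ [' ']) acc) ++ []
        else
          ((PySem.List.pyRange 0 (PySem.List.len values) 1).foldl (fun hist j =>
            if PySem.List.pyGetD values j 0 = h - i ∨ h - i < PySem.List.pyGetD values j 0
            then hist ++ ['*'] else hist ++ [' ']) acc) ++ ['\n'])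
        = acc ++ (values.map (fun v => if h - i ≤ v then '*' else ' ')
            ++ (if i = h - 1 then ([] : List Char) else ['\n'])) := by
      intro acc i _
      rw [hinner]
      split_ifs <;> simp
    have hsplit : PySem.List.pyRange 0 h 1 = PySem.List.pyRange 0 (h - 1) 1 ++ [h - 1] := by
      rw [PySem.List.pyRange_one 0 h, PySem.List.pyRange_one 0 (h - 1),
        show h - 0 = h from by ring, show h - 1 - 0 = h - 1 from by ring,
        show h.toNat = m + 1 from by omega, show (h - 1).toNat = m from by omega,
        List.range_succ, List.map_append]
      simp [hmi]
    have hA : ((List.range m).map (fun k : Nat => (0 : Int) + (k : Int))).flatMap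
        (fun i => values.map (fun v => if h - i ≤ v then '*' else ' ')
          ++ (if i = h - 1 then ([] : List Char) else ['\n']))
        = (List.range m).flatMap (fun k => pvRow h values k ++ ['\n']) :=
      pv_flatMap_map_congr _ _ _ _ (by
        intro k hk
        have hkm := List.mem_range.mp hk
        simp only [zero_add, pvRow]
        rw [if_neg (by omega)])
    have hB : ((List.range m).map (pvRow h values)).flatMap (fun r => r ++ ['\n'])
        = (List.range m).flatMap (fun k => pvRow h values k ++ ['\n']) :=
      pv_flatMap_map_congr _ _ _ _ (fun k _ => rfl)
    rw [PySem.List.foldl_congr_mem (PySem.List.pyRange 0 h 1) _ _ [] hstep,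
      PySem.List.foldl_append_eq_flatMap, List.nil_append,
      hsplit, List.flatMap_append, List.flatMap_singleton,
      PySem.List.pyRange_one 0 (h - 1), show (h - 1 - 0).toNat = m from by omega,
      hm, List.range_succ, List.map_append, List.map_singleton, join_snoc, hA, hB]
    simp [pvRow, ← hmi]
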